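-- pv_equiv track=rewrite | github.com/thzva/Deeppersona | generate_user_profile_old/data/select_attributes.py | select_top_attributes
-- ===== SOURCE A (Python) =====
-- def select_top_attributes(path_list, target_count=200):
--     """
--     从路径列表中选择最重要和最具代表性的顶级属性。
--
--     参数：
--         path_list: 属性路径列表
--         target_count: 要选择的目标属性数量
--
--     返回：
--         选定的属性路径列表
--     """
--     if not path_list:
--         return []
--
--     # If we already have fewer paths than target, return all of them
--     if len(path_list) <= target_count:
--         return path_list
--
--     # Extract unique top-level categories
--     categories = {}
--     for path in path_list:
--         parts = path.split('.')
--         if len(parts) > 0: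
--             category = parts[0]
--             if category not in categories:
--                 categories[category] = []
--             categories[category].append(path)
--
--     # Calculate how many attributes to select from each category
--     # proportional to their representation in the original list
--     total_paths = len(path_list)
--     category_counts = {}
--     for category, paths in categories.items():
--         # Calculate proportional count but ensure at least 1 attribute per category
--         count = max(1, int(len(paths) / total_paths * target_count))
--         category_counts[category] = count
--
--     # Adjust counts to match target_count as closely as possible
--     total_selected = sum(category_counts.values())
--     if total_selected < target_count:
--         # Distribute remaining slots to largest categories
--         remaining = target_count - total_selected
--         sorted_categories = sorted(categories.keys(),
--                                   key=lambda c: len(categories[c]),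
--                                   reverse=True)
--         for i in range(remaining):
--             if i < len(sorted_categories):
--                 category_counts[sorted_categories[i]] += 1
--     elif total_selected > target_count:
--         # Remove from largest categories until we hit target
--         excess = total_selected - target_count
--         sorted_categories = sorted(categories.keys(),
--                                   key=lambda c: category_counts[c],
--                                   reverse=True)
--         for i in range(excess):
--             if i < len(sorted_categories) and category_counts[sorted_categories[i]] > 1:
--                 category_counts[sorted_categories[i]] -= 1
--
--     # Select paths from each category
--     selected_paths = []
--     for category, count in category_counts.items():
--         category_paths = categories[category]
--
--         # Prioritize paths with fewer segments (more general attributes)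
--         # and paths that represent common attributes across domains
--         scored_paths = []
--         for path in category_paths:
--             parts = path.split('.')
--             # Score is based on path depth (shorter is better) and presence of common terms
--             common_terms = ['general', 'common', 'basic', 'core', 'essential', 'fundamental', 'key']
--             common_term_bonus = any(term in path.lower() for term in common_terms)
--             score = (10 - len(parts)) + (5 if common_term_bonus else 0)
--             scored_paths.append((path, score))
--
--         # Sort by score (higher is better) and select top paths
--         sorted_paths = sorted(scored_paths, key=lambda x: x[1], reverse=True)
--         selected_category_paths = [p[0] for p in sorted_paths[:count]]
--         selected_paths.extend(selected_category_paths)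
--
--     return selected_paths
-- ===== SOURCE B (Python) =====
-- def select_top_attributes(path_list, target_count=200):
--     """Proportional per-category selection; per-category top paths picked by a
--     single-pass bucket-by-score table walked in descending score order instead
--     of scoring + full stable sort."""
--     if not path_list:
--         return []
--     if len(path_list) <= target_count:
--         return path_list
--
--     categories = {}
--     for path in path_list:
--         categories.setdefault(path.split('.')[0], []).append(path)
--
--     total = len(path_list)
--     counts = {c: max(1, int(len(ps) / total * target_count))
--               for c, ps in categories.items()}
--
--     diff = target_count - sum(counts.values())
--     if diff > 0:
--         order = sorted(categories, key=lambda c: len(categories[c]), reverse=True)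
--         for c in order[:diff]:
--             counts[c] += 1
--     elif diff < 0:
--         order = sorted(categories, key=lambda c: counts[c], reverse=True)
--         for c in order[:-diff]:
--             if counts[c] > 1:
--                 counts[c] -= 1
--
--     COMMON = ('general', 'common', 'basic', 'core', 'essential', 'fundamental', 'key')
--     selected = []
--     for c, take in counts.items():
--         buckets = {}
--         for path in categories[c]:
--             lo = path.lower()
--             score = 10 - len(path.split('.')) + (5 if any(t in lo for t in COMMON) else 0)
--             buckets.setdefault(score, []).append(path)
--         for s in sorted(buckets, reverse=True):
--             b = buckets[s]
--             selected.extend(b[:take])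
--             take -= len(b)
--             if take <= 0:
--                 break
--     return selected
-- ===== Notes on version B (the rewrite author's own statement) =====
-- stated objective: alternative
-- what changed: Per-category selection replaces score-then-stable-reverse-sort-then-slice by a single pass that appends each path to a bucket keyed by its score, then walks only the distinct scores in descending order, stopping once `count` paths are taken; the two count-adjustment loops become folds over a slice of the sorted category list instead of range(n) loops with index guards.
import Mathlib
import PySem

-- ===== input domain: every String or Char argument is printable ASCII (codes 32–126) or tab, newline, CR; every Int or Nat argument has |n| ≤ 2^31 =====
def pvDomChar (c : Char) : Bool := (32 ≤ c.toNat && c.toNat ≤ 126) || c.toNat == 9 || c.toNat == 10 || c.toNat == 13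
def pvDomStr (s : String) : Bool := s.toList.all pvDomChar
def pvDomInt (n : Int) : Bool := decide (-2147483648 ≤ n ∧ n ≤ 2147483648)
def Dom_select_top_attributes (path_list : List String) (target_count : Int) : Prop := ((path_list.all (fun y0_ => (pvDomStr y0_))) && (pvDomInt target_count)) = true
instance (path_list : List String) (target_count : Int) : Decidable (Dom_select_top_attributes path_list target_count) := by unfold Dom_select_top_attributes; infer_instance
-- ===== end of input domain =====

-- B replaces the per-category score-and-stable-sort by a single-pass bucket table walked in
-- descending score order (alternative algorithm; everything else computed as in A).

-- ===== PORT A =====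
-- Shared exact model of CPython's `int(len(paths) / total_paths * target_count)` (the identical
-- line appears in both Pythons): IEEE-754 double division then multiplication, round to nearest
-- even, then truncation toward zero.  Hand-ported; exact for 0 < a ≤ n and any integer t.
def pvRoundRat (num den : Nat) : Nat × Int :=
  -- round the positive rational num/den to the nearest double, as (mantissa ∈ [2^52,2^53], exp)
  let s0 : Int := 52 + (den.log2 : Int) - (num.log2 : Int)
  let scale : Int → Nat × Nat := fun s =>
    if 0 ≤ s then (num <<< s.toNat, den) else (num, den <<< (-s).toNat)
  let s : Int := if ((scale s0).1 / (scale s0).2) < 2 ^ 52 then s0 + 1 else s0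
  let N := (scale s).1
  let D := (scale s).2
  let q := N / D
  let r := N % D
  let m := q + (if D < 2 * r then 1 else if 2 * r < D then 0 else q % 2)
  if m = 2 ^ 53 then (2 ^ 52, 1 - s) else (m, -s)

def pvRoundProd (P : Nat) (e : Int) : Nat × Int :=
  -- round the positive integer P (times 2^e) to 53 significant bits, nearest even
  let B := P.log2
  if B ≤ 52 then (P, e)
  else
    let sh := B - 52
    let q := P >>> sh
    let r := P % 2 ^ sh
    let half := 2 ^ (sh - 1)
    let m := q + (if half < r then 1 else if r < half then 0 else q % 2)
    if m = 2 ^ 53 then (2 ^ 52, e + sh + 1) else (m, e + sh)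

def pvTruncPos (a n t : Nat) : Nat :=
  -- int(a/n * t) for nonnegative t (floor = truncation: the value is nonnegative)
  if t = 0 ∨ a = 0 then 0
  else
    let me := pvRoundRat a n
    let me2 := pvRoundProd (me.1 * t) me.2
    if 0 ≤ me2.2 then me2.1 <<< me2.2.toNat else me2.1 >>> (-me2.2).toNat

def pvIntDivMulTrunc (a n : Nat) (t : Int) : Int :=
  -- int(a/n * t): IEEE rounding and int() truncation are symmetric under negating t
  if t < 0 then -(pvTruncPos a n (-t).toNat : Int) else (pvTruncPos a n t.toNat : Int)

-- path.split('.')  (sep ≠ "", so split? always returns a value) — the same call in both Pythons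
def pvSplit (s : String) : List String := (PySem.Str.split? s ".").getD []

def pvCommonTerms : List String :=
  ["general", "common", "basic", "core", "essential", "fundamental", "key"]

-- the per-path score line, identical in both Pythons:
-- (10 - len(parts)) + (5 if any(term in path.lower() for term in common_terms) else 0)
def pvScore (path : String) : Int :=
  ((10 : Int) - ((pvSplit path).length : Int)) +
    (if pvCommonTerms.any (fun term => PySem.Str.isIn term (PySem.Str.lower path)) then 5 else 0)

-- A's `categories` loop: membership test, seed with [], then append
def pvGroupStepA (d : PySem.Dict String (List String)) (path : String) :
    PySem.Dict String (List String) :=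
  let parts := pvSplit path
  if 0 < parts.length then
    let category := (PySem.List.pyGet? parts 0).getD ""   -- parts[0]; in range: parts ≠ []
    let d' := if d.contains category then d else d.insert category []
    d'.modify category [] (fun l => l ++ [path])
  else d

def pvGroupA (path_list : List String) : PySem.Dict String (List String) :=
  path_list.foldl pvGroupStepA PySem.Dict.empty

-- the `category_counts` dict (the identical loop/comprehension appears in both Pythons)
def pvCountsInit (categories : PySem.Dict String (List String)) (total : Nat) (t : Int) :
    PySem.Dict String Int :=
  categories.items.foldl
    (fun cc it => cc.insert it.1 (max 1 (pvIntDivMulTrunc it.2.length total t)))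
    PySem.Dict.empty

-- A's two count-adjustment loops: `for i in range(...)` with an index guard
def pvAdjustA (categories : PySem.Dict String (List String)) (cc0 : PySem.Dict String Int)
    (t : Int) : PySem.Dict String Int :=
  let total_selected := cc0.values.sum
  if total_selected < t then
    let remaining := t - total_selected
    let sc := PySem.List.sorted categories.keys (fun c => (categories.getD c []).length) true
    (PySem.List.pyRange 0 remaining).foldl
      (fun cc i =>
        if i < (sc.length : Int) then
          cc.modify ((PySem.List.pyGet? sc i).getD "") 0 (· + 1)
        else cc) cc0
  else if t < total_selected then
    let excess := total_selected - t
    let sc := PySem.List.sorted categories.keys (fun c => cc0.getD c 0) true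
    (PySem.List.pyRange 0 excess).foldl
      (fun cc i =>
        if i < (sc.length : Int) then
          if 1 < cc.getD ((PySem.List.pyGet? sc i).getD "") 0 then
            cc.modify ((PySem.List.pyGet? sc i).getD "") 0 (· - 1)
          else cc
        else cc) cc0
  else cc0

-- A's selection: score every path, stable reverse sort by score, slice off `count`
def pvSelectA (categories : PySem.Dict String (List String)) (cc : PySem.Dict String Int) :
    List String :=
  cc.items.foldl
    (fun sel it =>
      let category_paths := categories.getD it.1 []
      let scored := category_paths.foldl (fun sp path => sp ++ [(path, pvScore path)]) []
      sel ++ (PySem.List.slice (PySem.List.sorted scored (fun x => x.2) true) none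
                (some it.2)).map (fun p => p.1)) []

def select_top_attributes (path_list : List String) (target_count : Int) : List String :=
  if path_list = [] then []
  else if (path_list.length : Int) ≤ target_count then path_list
  else
    let categories := pvGroupA path_list
    let cc := pvCountsInit categories path_list.length target_count
    pvSelectA categories (pvAdjustA categories cc target_count)

-- ===== PORT B =====
-- B's grouping: setdefault then append
def pvGroupB (path_list : List String) : PySem.Dict String (List String) :=
  path_list.foldl
    (fun d path =>
      let k := (PySem.List.pyGet? (pvSplit path) 0).getD ""
      (d.setdefault k []).modify k [] (fun l => l ++ [path]))
    PySem.Dict.empty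

-- B's count adjustments: fold over a slice of the sorted key list, no index arithmetic
def pvAdjustB (categories : PySem.Dict String (List String)) (cc0 : PySem.Dict String Int)
    (t : Int) : PySem.Dict String Int :=
  let diff := t - cc0.values.sum
  if 0 < diff then
    let order := PySem.List.sorted categories.keys (fun c => (categories.getD c []).length) true
    (PySem.List.slice order none (some diff)).foldl (fun cc c => cc.modify c 0 (· + 1)) cc0
  else if diff < 0 then
    let order := PySem.List.sorted categories.keys (fun c => cc0.getD c 0) true
    (PySem.List.slice order none (some (-diff))).foldl
      (fun cc c => if 1 < cc.getD c 0 then cc.modify c 0 (· - 1) else cc) cc0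
  else cc0

-- B's per-category bucket table: score ↦ paths with that score, in encounter order
def pvBuckets (paths : List String) : PySem.Dict Int (List String) :=
  paths.foldl
    (fun b path =>
      let score := pvScore path
      (b.setdefault score []).modify score [] (fun l => l ++ [path]))
    PySem.Dict.empty

-- B's descending walk over the bucket keys with early break once `take` paths are out
def pvWalk (ds : List Int) (b : PySem.Dict Int (List String)) (take : Int)
    (sel : List String) : List String :=
  match ds with
  | [] => sel
  | s :: rest =>
    let bl := b.getD s []
    let sel' := sel ++ PySem.List.slice bl none (some take)
    let take' := take - bl.length
    if take' ≤ 0 then sel' else pvWalk rest b take' sel'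

def pvSelectB (categories : PySem.Dict String (List String)) (cc : PySem.Dict String Int) :
    List String :=
  cc.items.foldl
    (fun sel it =>
      let buckets := pvBuckets (categories.getD it.1 [])
      pvWalk (PySem.List.sorted buckets.keys (fun s => s) true) buckets it.2 sel) []

def select_top_attributes_alt (path_list : List String) (target_count : Int) : List String :=
  if path_list = [] then []
  else if (path_list.length : Int) ≤ target_count then path_list
  else
    let categories := pvGroupB path_list
    let counts := pvCountsInit categories path_list.length target_count
    pvSelectB categories (pvAdjustB categories counts target_count)

-- ===== PRECONDITION & SPEC =====
def Spec_select_top_attributes (path_list : List String) (target_count : Int) (out : List String) : Prop := out = select_top_attributes_alt path_list target_count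
instance (path_list : List String) (target_count : Int) (out : List String) : Decidable (Spec_select_top_attributes path_list target_count out) := by unfold Spec_select_top_attributes; infer_instance

-- ===== CLAIM (what is proved, stated in full; the proofs are below) =====
def Claim_equal_select_top_attributes : Prop := ∀ (path_list : List String) (target_count : Int), Dom_select_top_attributes path_list target_count → Spec_select_top_attributes path_list target_count (select_top_attributes path_list target_count)

-- ===== LEMMAS AND PROOFS =====

theorem go_ne_nil (sep : List Char) : ∀ (fuel : Nat) (l cur : List Char) (acc : List (List Char)),
    PySem.Chars.splitOn.go sep fuel l cur acc ≠ [] := by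
  intro fuel
  induction fuel with
  | zero => intro l cur acc; simp [PySem.Chars.splitOn.go]
  | succ n ih =>
    intro l cur acc
    cases l with
    | nil => simp [PySem.Chars.splitOn.go]
    | cons c rest =>
      rw [PySem.Chars.splitOn.go]
      split
      · exact ih _ _ _
      · exact ih _ _ _

theorem pvSplit_ne_nil (s : String) : pvSplit s ≠ [] := by
  unfold pvSplit
  simp [PySem.Str.split?, PySem.Chars.split?, PySem.Chars.splitOn]
  intro h
  exact go_ne_nil _ _ _ _ _ h

theorem setdefault_modify {κ ν : Type} [BEq κ] [LawfulBEq κ] (d : PySem.Dict κ ν) (k : κ)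
    (v : ν) (f : ν → ν) : (d.setdefault k v).modify k v f = d.modify k v f := by
  by_cases h : d.contains k
  · rw [PySem.Dict.setdefault_of_contains d v h]
  · rw [PySem.Dict.setdefault_of_not_contains d v (by simpa using h)]
    show (d.insert k v).modify k v f = _
    unfold PySem.Dict.modify
    rw [PySem.Dict.getD_insert_self, PySem.Dict.insert_insert_self,
      PySem.Dict.getD_of_not_contains d v (by simpa using h)]

theorem group_eq (path_list : List String) : pvGroupA path_list = pvGroupB path_list := by
  unfold pvGroupA pvGroupB
  apply List.foldl_ext
  intro d path _
  unfold pvGroupStepA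
  have hp : 0 < (pvSplit path).length := List.length_pos_iff.mpr (pvSplit_ne_nil path)
  simp only [hp, if_true]
  by_cases h : d.contains ((PySem.List.pyGet? (pvSplit path) 0).getD "")
  · rw [PySem.Dict.setdefault_of_contains _ _ h]
    simp [h]
  · rw [PySem.Dict.setdefault_of_not_contains _ _ (by simpa using h)]
    simp [h]

theorem range_guard_foldl {α β : Type} (xs : List α) (dflt : α) (f : β → α → β) (r : Int)
    (hr : 0 ≤ r) (init : β) :
    (PySem.List.pyRange 0 r).foldl
      (fun acc i => if i < (xs.length : Int) then f acc ((PySem.List.pyGet? xs i).getD dflt)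
                    else acc) init
      = (xs.take r.toNat).foldl f init := by
  rw [show r = ((r.toNat : Nat) : Int) by omega, PySem.List.pyRange_zero_natCast,
    List.foldl_map]
  simp only [Int.toNat_natCast]
  generalize r.toNat = n
  induction n generalizing init with
  | zero => simp
  | succ m ih =>
    rw [List.range_succ, List.foldl_append, ih, List.take_add_one]
    by_cases hm : m < xs.length
    · rw [List.foldl_append]
      simp [hm, PySem.List.pyGet?_natCast]
    · have h1 : xs.take m = xs := List.take_of_length_le (by omega)
      have h2 : xs.take (m+1) = xs := List.take_of_length_le (by omega)
      simp [hm, h1]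

theorem adjust_eq (categories : PySem.Dict String (List String)) (cc0 : PySem.Dict String Int)
    (t : Int) : pvAdjustA categories cc0 t = pvAdjustB categories cc0 t := by
  simp only [pvAdjustA, pvAdjustB]
  by_cases h1 : cc0.values.sum < t
  · rw [if_pos h1, if_pos (by omega : (0:Int) < t - cc0.values.sum)]
    rw [range_guard_foldl (PySem.List.sorted categories.keys
        (fun c => (categories.getD c []).length) true) ""
        (fun cc c => cc.modify c 0 (· + 1)) (t - cc0.values.sum) (by omega) cc0,
      PySem.List.slice_to _ (b := t - cc0.values.sum) (by omega)]
  · rw [if_neg h1, if_neg (by omega : ¬ (0:Int) < t - cc0.values.sum)]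
    by_cases h2 : t < cc0.values.sum
    · rw [if_pos h2, if_pos (by omega : t - cc0.values.sum < 0)]
      rw [range_guard_foldl (PySem.List.sorted categories.keys
          (fun c => cc0.getD c 0) true) ""
          (fun cc c => if 1 < cc.getD c 0 then cc.modify c 0 (· - 1) else cc)
          (cc0.values.sum - t) (by omega) cc0,
        show -(t - cc0.values.sum) = cc0.values.sum - t by ring,
        PySem.List.slice_to _ (b := cc0.values.sum - t) (by omega)]
    · rw [if_neg h2, if_neg (by omega : ¬ t - cc0.values.sum < 0)]

theorem foldl_preserve {β γ : Type} (P : γ → Prop) (st : γ → β → γ) (l : List β) (init : γ)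
    (h0 : P init) (hst : ∀ d c, P d → P (st d c)) : P (l.foldl st init) := by
  induction l generalizing init with
  | nil => exact h0
  | cons c cs ih => exact ih _ (hst _ _ h0)

theorem countsInit_getD_nonneg (categories : PySem.Dict String (List String)) (total : Nat)
    (t : Int) : ∀ c, 0 ≤ (pvCountsInit categories total t).getD c 0 := by
  unfold pvCountsInit
  refine foldl_preserve (fun d => ∀ c, 0 ≤ PySem.Dict.getD d c 0) _ _ _ ?_ ?_
  · intro c; simp [PySem.Dict.getD_empty]
  · intro d it h c
    rw [PySem.Dict.getD_insert]
    split
    · have := le_max_left (1 : Int) (pvIntDivMulTrunc it.2.length total t); omega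
    · exact h c

theorem countsInit_keys_nodup (categories : PySem.Dict String (List String)) (total : Nat)
    (t : Int) : (pvCountsInit categories total t).keys.Nodup := by
  unfold pvCountsInit
  exact PySem.Dict.nodup_keys_foldl_insert_key categories.items
    (fun (it : String × List String) => it.1)
    (fun cc (it : String × List String) => max 1 (pvIntDivMulTrunc it.2.length total t))
    PySem.Dict.empty (by simp [PySem.Dict.keys_empty])

theorem nodup_keys_modify {κ ν : Type} [BEq κ] [LawfulBEq κ] (d : PySem.Dict κ ν) (k : κ)
    (d0 : ν) (f : ν → ν) (h : d.keys.Nodup) : (d.modify k d0 f).keys.Nodup := by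
  rw [PySem.Dict.keys_modify]
  by_cases hc : d.contains k
  · rw [PySem.Dict.keys_insert_of_contains _ _ hc]; exact h
  · rw [PySem.Dict.keys_insert_of_not_contains _ _ (by simpa using hc)]
    have hk : k ∉ d.keys := fun hm =>
      (show d.contains k ≠ true by simpa using hc) ((PySem.Dict.contains_iff_mem_keys d k).mpr hm)
    simp only [List.nodup_append, List.nodup_cons]
    refine ⟨h, by simp, ?_⟩
    intro a ha b hb
    simp only [List.mem_singleton] at hb
    subst hb
    exact fun hab => hk (hab ▸ ha)

theorem adjust_keys_nodup (categories : PySem.Dict String (List String))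
    (cc0 : PySem.Dict String Int) (t : Int) (h : cc0.keys.Nodup) :
    (pvAdjustB categories cc0 t).keys.Nodup := by
  simp only [pvAdjustB]
  split
  · exact foldl_preserve (fun d => (PySem.Dict.keys d).Nodup) _ _ _ h
      (fun d c hd => nodup_keys_modify _ _ _ _ hd)
  split
  · exact foldl_preserve (fun d => (PySem.Dict.keys d).Nodup) _ _ _ h
      (fun d c hd => by dsimp only; split; exacts [nodup_keys_modify _ _ _ _ hd, hd])
  · exact h

theorem adjust_getD_nonneg (categories : PySem.Dict String (List String))
    (cc0 : PySem.Dict String Int) (t : Int) (h0 : ∀ c, 0 ≤ cc0.getD c 0) :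
    ∀ c, 0 ≤ (pvAdjustB categories cc0 t).getD c 0 := by
  simp only [pvAdjustB]
  split
  · refine foldl_preserve (fun d => ∀ c, 0 ≤ PySem.Dict.getD d c 0) _ _ _ h0 ?_
    intro d c hd c'
    rw [PySem.Dict.getD_modify]
    split
    · have := hd c; omega
    · exact hd c'
  split
  · refine foldl_preserve (fun d => ∀ c, 0 ≤ PySem.Dict.getD d c 0) _ _ _ h0 ?_
    intro d c hd c'
    dsimp only
    split
    · rw [PySem.Dict.getD_modify]
      split
      · next hgt _ => omega
      · exact hd c'
    · exact hd c'
  · exact h0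

theorem insertBy_skip {α : Type} (before : α → α → Bool) (x : α) (l1 l2 : List α)
    (h : ∀ y ∈ l1, before x y = false) :
    PySem.List.insertBy before x (l1 ++ l2) = l1 ++ PySem.List.insertBy before x l2 := by
  induction l1 with
  | nil => simp
  | cons y ys ih =>
    rw [List.cons_append, PySem.List.insertBy]
    simp only [h y (by simp), Bool.false_eq_true, if_false]
    rw [ih (fun z hz => h z (by simp [hz]))]
    simp

theorem insertBy_front {α : Type} (before : α → α → Bool) (x : α) (l : List α)
    (h : ∀ y ∈ l, before x y = true) :
    PySem.List.insertBy before x l = x :: l := by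
  cases l with
  | nil => rw [PySem.List.insertBy]
  | cons y ys => rw [PySem.List.insertBy]; simp [h y (by simp)]

theorem insertBy_buckets {α : Type} (key : α → Int) (ds : List Int) (xs : List α) (x : α)
    (hsort : ds.Pairwise (fun a b => b < a)) (hx : key x ∈ ds) :
    PySem.List.insertBy (fun a b => decide (key b < key a)) x
        (ds.flatMap (fun s => xs.filter (fun y => key y == s)))
      = ds.flatMap (fun s => (xs ++ [x]).filter (fun y => key y == s)) := by
  induction ds with
  | nil => simp at hx
  | cons s rest ih =>
    rcases List.pairwise_cons.mp hsort with ⟨hs, hrest⟩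
    simp only [List.flatMap_cons]
    by_cases hk : key x = s
    · rw [insertBy_skip _ _ _ _ (fun y hy => by
        simp only [List.mem_filter, beq_iff_eq] at hy
        simp [hy.2, hk])]
      rw [insertBy_front _ _ _ (fun y hy => by
        simp only [List.mem_flatMap, List.mem_filter, beq_iff_eq] at hy
        rcases hy with ⟨s', hs', _, hkey⟩
        simp [hkey, hk, hs s' hs'])]
      have h1 : (xs ++ [x]).filter (fun y => key y == s) = xs.filter (fun y => key y == s) ++ [x] := by
        rw [List.filter_append]
        simp [hk]
      have h2 : rest.flatMap (fun s' => (xs ++ [x]).filter (fun y => key y == s'))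
          = rest.flatMap (fun s' => xs.filter (fun y => key y == s')) := by
        rw [List.flatMap_def, List.flatMap_def]
        congr 1
        apply List.map_congr_left
        intro s' hs'
        rw [List.filter_append]
        have : key x ≠ s' := by have := hs s' hs'; omega
        simp [this]
      rw [h1, h2]
      simp
    · have hx' : key x ∈ rest := by
        rcases List.mem_cons.mp hx with h | h
        · exact absurd h hk
        · exact h
      rw [insertBy_skip _ _ _ _ (fun y hy => by
        simp only [List.mem_filter, beq_iff_eq] at hy
        simp only [hy.2]
        simp [not_lt.mpr (le_of_lt (hs _ hx'))])]
      rw [ih hrest hx']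
      have h1 : (xs ++ [x]).filter (fun y => key y == s) = xs.filter (fun y => key y == s) := by
        rw [List.filter_append]
        simp [hk]
      rw [h1]

theorem stable_rev_sort_buckets {α : Type} (key : α → Int) (ds : List Int) (xs : List α)
    (hsort : ds.Pairwise (fun a b => b < a)) (hmem : ∀ x ∈ xs, key x ∈ ds) :
    PySem.List.sorted xs key true = ds.flatMap (fun s => xs.filter (fun x => key x == s)) := by
  induction xs using List.reverseRecOn with
  | nil => simp [(PySem.List.sorted_eq_nil_iff ([] : List α) key true).mpr rfl]
  | append_singleton xs x ih =>
    rw [PySem.List.sorted_rev_eq_foldl_insertBy, List.foldl_append, List.foldl_cons,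
      List.foldl_nil, ← PySem.List.sorted_rev_eq_foldl_insertBy,
      ih (fun y hy => hmem y (by simp [hy]))]
    exact insertBy_buckets key ds xs x hsort (hmem x (by simp))

theorem walk_eq_take (b : PySem.Dict Int (List String)) :
    ∀ (ds : List Int) (k : Int) (sel : List String), 0 ≤ k →
    pvWalk ds b k sel = sel ++ (ds.flatMap (fun s => b.getD s [])).take k.toNat := by
  intro ds
  induction ds with
  | nil => intro k sel hk; simp [pvWalk]
  | cons s rest ih =>
    intro k sel hk
    simp only [pvWalk, List.flatMap_cons]
    rw [PySem.List.slice_to _ hk, List.take_append]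
    by_cases hb : k - (b.getD s []).length ≤ 0
    · rw [if_pos (by simpa using hb)]
      have : k.toNat - (b.getD s []).length = 0 := by omega
      simp [this]
    · rw [if_neg (by simpa using hb)]
      rw [ih _ _ (by omega)]
      have h1 : (b.getD s []).take k.toNat = b.getD s [] :=
        List.take_of_length_le (by omega)
      have h2 : (k - (b.getD s []).length).toNat = k.toNat - (b.getD s []).length := by omega
      rw [h1, h2, List.append_assoc]

theorem buckets_foldl (paths : List String) :
    pvBuckets paths
      = (paths.map (fun p => (pvScore p, p))).foldl
          (fun b q => b.modify q.1 [] (fun l => l ++ [q.2])) PySem.Dict.empty := by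
  unfold pvBuckets
  rw [List.foldl_map]
  apply List.foldl_ext
  intro b p _
  exact setdefault_modify b (pvScore p) [] (fun l => l ++ [p])

theorem buckets_getD (paths : List String) (s : Int) :
    (pvBuckets paths).getD s [] = paths.filter (fun p => pvScore p == s) := by
  rw [buckets_foldl, PySem.Dict.getD_foldl_modify_append, PySem.Dict.getD_empty]
  rw [List.filter_map]
  rw [show ((fun (q : Int × String) => q.1 == s) ∘ fun p => (pvScore p, p))
      = fun p => pvScore p == s from rfl]
  simp only [List.map_map]
  rw [show ((fun (x : Int × String) => x.2) ∘ fun p => (pvScore p, p)) = id from rfl,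
    List.map_id, List.nil_append]

theorem buckets_keys (paths : List String) :
    (pvBuckets paths).keys = PySem.Set.ofList (paths.map pvScore) := by
  rw [buckets_foldl, List.foldl_map]
  rw [show (fun (b : PySem.Dict Int (List String)) (p : String) =>
        b.modify ((fun q => (pvScore q, q)) p).1 [] fun l => l ++ [((fun q => (pvScore q, q)) p).2])
      = fun b p => b.modify (pvScore p) [] (fun l => l ++ [p]) from rfl]
  rw [PySem.Dict.keys_foldl_modify_key paths pvScore [] (fun _ p => fun l => l ++ [p])
    PySem.Dict.empty]
  rw [PySem.Set.ofList_eq_foldl]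
  rfl

theorem select_eq (categories : PySem.Dict String (List String)) (cc : PySem.Dict String Int)
    (h : ∀ it ∈ cc.items, 0 ≤ it.2) : pvSelectA categories cc = pvSelectB categories cc := by
  simp only [pvSelectA, pvSelectB]
  apply List.foldl_ext
  intro sel it hit
  have hk : 0 ≤ it.2 := h it hit
  set paths := categories.getD it.1 [] with hpaths
  rw [PySem.List.foldl_append_singleton_eq_map (fun path => (path, pvScore path)) paths []]
  simp only [List.nil_append]
  set ds := PySem.List.sorted (pvBuckets paths).keys (fun s => s) true with hds
  have hnd : ds.Nodup := by
    have hperm := PySem.List.sorted_perm (pvBuckets paths).keys (fun s => s) true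
    exact (hperm.nodup_iff).mpr (buckets_keys paths ▸ PySem.Set.nodup_ofList _)
  have hsort : ds.Pairwise (fun a b => b < a) := by
    have h1 := PySem.List.sorted_pairwise_rev (pvBuckets paths).keys (fun s => s)
    exact (List.Pairwise.and h1 hnd).imp (fun {a b} hab => lt_of_le_of_ne hab.1 (Ne.symm hab.2))
  have hmem : ∀ x ∈ paths.map (fun p => (p, pvScore p)), (fun (q : String × Int) => q.2) x ∈ ds := by
    intro x hx
    rcases List.mem_map.mp hx with ⟨p, hp, rfl⟩
    rw [hds, PySem.List.mem_sorted, buckets_keys, PySem.Set.mem_ofList]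
    exact List.mem_map.mpr ⟨p, hp, rfl⟩
  rw [stable_rev_sort_buckets (fun q => q.2) ds (paths.map (fun p => (p, pvScore p))) hsort hmem]
  rw [walk_eq_take (pvBuckets paths) ds it.2 sel hk]
  rw [PySem.List.slice_to _ hk]
  congr 1
  rw [List.map_take, List.map_flatMap]
  congr 1
  rw [List.flatMap_def, List.flatMap_def]
  congr 1
  apply List.map_congr_left
  intro s _
  rw [buckets_getD, List.filter_map]
  rw [show ((fun (q : String × Int) => q.2 == s) ∘ fun p => (p, pvScore p))
      = fun p => pvScore p == s from rfl]
  rw [List.map_map, show ((fun (q : String × Int) => q.1) ∘ fun p => (p, pvScore p)) = id from rfl,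
    List.map_id]

-- ===== VERDICT (by name: the statement is the Claim_ definition above) =====
theorem select_top_attributes_spec : Claim_equal_select_top_attributes := by
  intro path_list target_count _
  unfold Spec_select_top_attributes
  simp only [select_top_attributes, select_top_attributes_alt]
  by_cases h1 : path_list = []
  · simp [h1]
  · rw [if_neg h1, if_neg h1]
    by_cases h2 : (path_list.length : Int) ≤ target_count
    · rw [if_pos h2, if_pos h2]
    · rw [if_neg h2, if_neg h2, group_eq, adjust_eq]
      apply select_eq
      intro it hit
      have hnd := adjust_keys_nodup (pvGroupB path_list)
        (pvCountsInit (pvGroupB path_list) path_list.length target_count) target_count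
        (countsInit_keys_nodup (pvGroupB path_list) path_list.length target_count)
      have hv := PySem.Dict.getD_of_mem_items _ (show (it.1, it.2) ∈ _ by simpa using hit) hnd 0
      have hge := adjust_getD_nonneg (pvGroupB path_list)
        (pvCountsInit (pvGroupB path_list) path_list.length target_count) target_count
        (countsInit_getD_nonneg (pvGroupB path_list) path_list.length target_count) it.1
      exact hv ▸ hge
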